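-- pv_equiv track=rewrite | github.com/cesium12/solver-tools | solvertools/anagram/permute.py | anagram_to_permutation
-- ===== SOURCE A (Python) =====
-- def anagram_to_permutation(original, anagrammed):
--     letterbank = list(original)
--     indices = []
--     for char in anagrammed:
--         try:
--             index = letterbank.index(char)
--         except ValueError:
--             raise ValueError("The inputs must be anagrams of each other")
--         indices.append(index)
--         letterbank[index] = None
--     return indices
-- ===== SOURCE B (Python) =====
-- def anagram_to_permutation(original, anagrammed):
--     positions = {}
--     for i, ch in enumerate(original):
--         positions.setdefault(ch, []).append(i)
--     used = {}
--     result = []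
--     for ch in anagrammed:
--         k = used.get(ch, 0)
--         plist = positions.get(ch, [])
--         if len(plist) <= k:
--             raise ValueError("The inputs must be anagrams of each other")
--         result.append(plist[k])
--         used[ch] = k + 1
--     return result
-- ===== Notes on version B (the rewrite author's own statement) =====
-- stated objective: faster
-- what changed: Replaces A's per-character linear scan of a mutated letterbank (list.index + None overwrite) by a char->positions index built in one pass over original plus a per-char cursor dict, so each anagrammed character is resolved in O(1).
import Mathlib
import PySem

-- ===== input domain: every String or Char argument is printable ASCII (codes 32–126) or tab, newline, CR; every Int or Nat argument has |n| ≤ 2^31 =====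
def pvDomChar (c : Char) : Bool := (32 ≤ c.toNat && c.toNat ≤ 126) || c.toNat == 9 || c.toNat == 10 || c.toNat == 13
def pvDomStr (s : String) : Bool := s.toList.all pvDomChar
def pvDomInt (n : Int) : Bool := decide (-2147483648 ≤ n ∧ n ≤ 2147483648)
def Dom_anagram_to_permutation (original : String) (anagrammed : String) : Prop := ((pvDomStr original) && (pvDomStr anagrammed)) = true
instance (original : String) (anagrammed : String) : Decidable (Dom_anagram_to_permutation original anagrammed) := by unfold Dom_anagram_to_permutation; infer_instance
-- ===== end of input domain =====

-- B replaces A's repeated list.index scan over a mutated letterbank by one char→positions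
-- index built in a single pass plus a per-char cursor dict (O(n+m) vs A's O(n·m)).

-- ===== PORT A =====
-- letterbank : list of Optional chars (entries become None once used); .index = PySem.List.index?
def pvBankLoop (anag : List Char) (bank : List (Option Char)) (acc : List Int) : List Int :=
  match anag with
  | [] => acc
  | c :: rest =>
    match PySem.List.index? bank (some c) with
    | none => acc   -- Python: raise ValueError("The inputs must be anagrams of each other"); excluded by Pre_
    | some k => pvBankLoop rest (bank.set k none) (acc ++ [(k : Int)])

def anagram_to_permutation (original : String) (anagrammed : String) : List Int :=
  pvBankLoop anagrammed.toList (original.toList.map some) []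

-- ===== PORT B =====
-- positions.setdefault(ch, []).append(i)  ==  d[ch] = d.get(ch, []) + [i]  ==  Dict.modify ch [] (· ++ [i])
def pvBuildPos (o : List Char) : PySem.Dict Char (List Int) :=
  (PySem.List.enumerate o 0).foldl (fun d p => d.modify p.2 [] (· ++ [p.1])) PySem.Dict.empty

def pvAltLoop (pos : PySem.Dict Char (List Int)) (anag : List Char)
    (used : PySem.Dict Char Int) (res : List Int) : List Int :=
  match anag with
  | [] => res
  | c :: rest =>
    let k := used.getD c 0
    let plist := pos.getD c []
    if (plist.length : Int) ≤ k then res   -- Python: raise ValueError(...); excluded by Pre_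
    else pvAltLoop pos rest (used.insert c (k + 1)) (res ++ [PySem.List.pyGetD plist k 0])

def anagram_to_permutation_alt (original : String) (anagrammed : String) : List Int :=
  pvAltLoop (pvBuildPos original.toList) anagrammed.toList PySem.Dict.empty []

-- ===== PRECONDITION & SPEC =====
-- Exactly the inputs where Python A returns: every char of anagrammed occurs at least as
-- often in original (otherwise A raises ValueError).
def Pre_anagram_to_permutation (original : String) (anagrammed : String) : Prop :=
  (anagrammed.toList.all
    (fun c => anagrammed.toList.count c ≤ original.toList.count c)) = true
instance (original : String) (anagrammed : String) : Decidable (Pre_anagram_to_permutation original anagrammed) := by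
  unfold Pre_anagram_to_permutation; infer_instance

def pvWitness_anagram_to_permutation : String × String := ("ab", "ba")

def Spec_anagram_to_permutation (original : String) (anagrammed : String) (out : List Int) : Prop := out = anagram_to_permutation_alt original anagrammed
instance (original : String) (anagrammed : String) (out : List Int) : Decidable (Spec_anagram_to_permutation original anagrammed out) := by unfold Spec_anagram_to_permutation; infer_instance

-- ===== CLAIM (what is proved, stated in full; the proofs are below) =====
def Claim_equal_anagram_to_permutation : Prop := ∀ (original : String) (anagrammed : String), Dom_anagram_to_permutation original anagrammed → Pre_anagram_to_permutation original anagrammed → Spec_anagram_to_permutation original anagrammed (anagram_to_permutation original anagrammed)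

-- ===== LEMMAS AND PROOFS =====

-- positions (0-based, counted from n) of the entries of bank equal to `some c`, in order
def pvOcc : List (Option Char) → Char → Nat → List Nat
  | [], _, _ => []
  | x :: xs, c, n => if x = some c then n :: pvOcc xs c (n + 1) else pvOcc xs c (n + 1)

theorem pvOcc_head? (bank : List (Option Char)) (c : Char) (n : Nat) :
    (pvOcc bank c n).head? = (PySem.List.index? bank (some c)).map (fun k => k + n) := by
  induction bank generalizing n with
  | nil => simp [pvOcc, PySem.List.index?]
  | cons x xs ih =>
    by_cases hx : x = some c
    · subst hx
      rw [PySem.List.index?_cons_self]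
      simp [pvOcc]
    · rw [PySem.List.index?_cons_of_ne xs hx]
      simp only [pvOcc, if_neg hx, ih]
      cases PySem.List.index? xs (some c) <;> simp
      omega

theorem pvOcc_head?_zero (bank : List (Option Char)) (c : Char) :
    (pvOcc bank c 0).head? = PySem.List.index? bank (some c) := by
  rw [pvOcc_head?]
  cases PySem.List.index? bank (some c) <;> simp

theorem pvOcc_set_self (bank : List (Option Char)) (c : Char) (k : Nat)
    (h : PySem.List.index? bank (some c) = some k) (n : Nat) :
    pvOcc (bank.set k none) c n = (pvOcc bank c n).tail := by
  induction bank generalizing n k with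
  | nil => simp [PySem.List.index?] at h
  | cons x xs ih =>
    by_cases hx : x = some c
    · subst hx
      rw [PySem.List.index?_cons_self] at h
      obtain rfl : k = 0 := (Option.some_inj.mp h).symm
      simp [pvOcc]
    · rw [PySem.List.index?_cons_of_ne xs hx] at h
      obtain ⟨j, hj, rfl⟩ := Option.map_eq_some_iff.mp h
      simp only [List.set_cons_succ, pvOcc, if_neg hx]
      exact ih j hj (n + 1)

theorem pvOcc_set_other (bank : List (Option Char)) (c c' : Char) (hne : c' ≠ c) (k : Nat)
    (h : PySem.List.index? bank (some c) = some k) (n : Nat) :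
    pvOcc (bank.set k none) c' n = pvOcc bank c' n := by
  induction bank generalizing n k with
  | nil => simp [PySem.List.index?] at h
  | cons x xs ih =>
    by_cases hx : x = some c
    · subst hx
      rw [PySem.List.index?_cons_self] at h
      obtain rfl : k = 0 := (Option.some_inj.mp h).symm
      have h2 : some c ≠ some c' := by simpa using (Ne.symm hne)
      simp [pvOcc, h2]
    · rw [PySem.List.index?_cons_of_ne xs hx] at h
      obtain ⟨j, hj, rfl⟩ := Option.map_eq_some_iff.mp h
      simp only [List.set_cons_succ, pvOcc]
      rw [ih j hj (n + 1)]

theorem pvEnum_filter (o : List Char) (c : Char) (n : Nat) :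
    ((PySem.List.enumerate o (n : Int)).filter (fun p => p.2 == c)).map (·.1)
      = (pvOcc (o.map some) c n).map (fun (j : Nat) => (j : Int)) := by
  induction o generalizing n with
  | nil => simp [PySem.List.enumerate_nil, pvOcc]
  | cons x xs ih =>
    rw [PySem.List.enumerate_cons, show (n : Int) + 1 = ((n + 1 : Nat) : Int) by push_cast; ring]
    by_cases hx : x = c
    · subst hx
      rw [List.filter_cons_of_pos (by simp), List.map_cons, ih]
      have hsx : (some x : Option Char) = some x := rfl
      simp [pvOcc]
    · rw [List.filter_cons_of_neg (by simp [hx]), ih]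
      have hsx : (some x : Option Char) ≠ some c := by simpa using hx
      simp [pvOcc, hsx]

theorem pvBuildPos_getD (o : List Char) (c : Char) :
    (pvBuildPos o).getD c [] = (pvOcc (o.map some) c 0).map (fun (j : Nat) => (j : Int)) := by
  have h1 : pvBuildPos o
      = ((PySem.List.enumerate o 0).map (fun p => (p.2, p.1))).foldl
          (fun d p => d.modify p.1 [] (· ++ [p.2])) PySem.Dict.empty := by
    simp [pvBuildPos, List.foldl_map]
  rw [h1, PySem.Dict.getD_foldl_modify_append, List.filter_map, List.map_map]
  simp only [Function.comp_def, PySem.Dict.getD_empty, List.nil_append]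
  have := pvEnum_filter o c 0
  rw [Nat.cast_zero] at this
  exact this

theorem pvLoop_eq (rest : List Char) (o : List Char) (bank : List (Option Char))
    (used : PySem.Dict Char Int) (acc : List Int)
    (hinv : ∀ c, ∃ u : Nat, used.getD c 0 = (u : Int)
        ∧ pvOcc bank c 0 = (pvOcc (o.map some) c 0).drop u) :
    pvBankLoop rest bank acc = pvAltLoop (pvBuildPos o) rest used acc := by
  induction rest generalizing bank used acc with
  | nil => rfl
  | cons c rest ih =>
    obtain ⟨u, hu, hocc⟩ := hinv c
    have hplist := pvBuildPos_getD o c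
    set posc := pvOcc (o.map some) c 0 with hposc
    by_cases hlt : u < posc.length
    · -- a match is found: both loops consume posc[u]
      have hdrop : posc.drop u = posc[u] :: posc.drop (u + 1) := List.drop_eq_getElem_cons hlt
      have hidx : PySem.List.index? bank (some c) = some posc[u] := by
        rw [← pvOcc_head?_zero, hocc, hdrop]; rfl
      have hcond : ¬ ((((pvBuildPos o).getD c []).length : Int) ≤ used.getD c 0) := by
        rw [hplist, List.length_map, hu]; omega
      have hval : PySem.List.pyGetD ((pvBuildPos o).getD c []) (used.getD c 0) 0
          = (posc[u] : Int) := by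
        rw [hplist, hu, PySem.List.pyGetD_natCast, List.getD_eq_getElem?_getD, List.getElem?_map,
          List.getElem?_eq_getElem hlt]
        rfl
      have hstepA : pvBankLoop (c :: rest) bank acc
          = pvBankLoop rest (bank.set posc[u] none) (acc ++ [(posc[u] : Int)]) := by
        rw [pvBankLoop, hidx]
      have hstepB : pvAltLoop (pvBuildPos o) (c :: rest) used acc
          = pvAltLoop (pvBuildPos o) rest (used.insert c (used.getD c 0 + 1))
              (acc ++ [(posc[u] : Int)]) := by
        rw [pvAltLoop]
        simp only [if_neg hcond, hval]
      rw [hstepA, hstepB, hu]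
      apply ih
      intro c'
      by_cases hc : c' = c
      · subst hc
        refine ⟨u + 1, ?_, ?_⟩
        · rw [PySem.Dict.getD_insert_self]; push_cast; ring
        · rw [pvOcc_set_self bank c' posc[u] hidx, hocc, hdrop, ← hposc, List.tail_cons]
      · obtain ⟨u', hu', hocc'⟩ := hinv c'
        exact ⟨u', by rw [PySem.Dict.getD_insert_of_ne used _ _ hc, hu'],
          by rw [pvOcc_set_other bank c c' hc posc[u] hidx, hocc']⟩
    · -- no match left: Python A and Python B both raise ValueError here; both ports stop
      have hlen : posc.length ≤ u := Nat.le_of_not_lt hlt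
      have hdrop : posc.drop u = [] := List.drop_eq_nil_of_le hlen
      have hidx : PySem.List.index? bank (some c) = none := by
        rw [← pvOcc_head?_zero, hocc, hdrop]; rfl
      have hcond : (((pvBuildPos o).getD c []).length : Int) ≤ used.getD c 0 := by
        rw [hplist, List.length_map, hu]; omega
      rw [pvBankLoop, hidx, pvAltLoop]
      simp only [if_pos hcond]

-- ===== VERDICT (by name: the statement is the Claim_ definition above) =====
theorem anagram_to_permutation_spec : Claim_equal_anagram_to_permutation := by
  intro o a _ _
  unfold Spec_anagram_to_permutation anagram_to_permutation anagram_to_permutation_alt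
  apply pvLoop_eq
  intro c
  exact ⟨0, by simp [PySem.Dict.getD_empty], by simp⟩
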